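-- pv_equiv track=rewrite | github.com/Dominiquo/interview_practice | concentricRectangles.py | row_maker
-- ===== SOURCE A (Python) =====
-- def row_maker(n,count):
-- 	row = []
-- 	if count == 1:
-- 		return [n]*(2*n -1)
-- 	if count == 1 and n == 1:
-- 		return [1]
-- 	else:
-- 		return [n] + row_maker(n-1,count-1) + [n]
-- 	return row
-- ===== SOURCE B (Python) =====
-- def row_maker(n, count):
--     # closed form: descending prefix n..m+1, center block of m repeated 2m-1 times,
--     # ascending suffix (mirror of the prefix)
--     m = n - count + 1
--     desc = list(range(n, m, -1))
--     return desc + [m] * (2 * m - 1) + desc[::-1]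
-- ===== Notes on version B (the rewrite author's own statement) =====
-- stated objective: faster
-- what changed: Replaced the recursion (which rebuilds the whole list with two concatenations per level) by a direct one-pass construction: descending prefix via range, a replicated center block, and the reversed prefix.
-- outside the precondition, e.g. on row_maker(3, 0): A raises RecursionError, B returns [4, 4, 4, 4, 4, 4, 4]
import Mathlib
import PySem

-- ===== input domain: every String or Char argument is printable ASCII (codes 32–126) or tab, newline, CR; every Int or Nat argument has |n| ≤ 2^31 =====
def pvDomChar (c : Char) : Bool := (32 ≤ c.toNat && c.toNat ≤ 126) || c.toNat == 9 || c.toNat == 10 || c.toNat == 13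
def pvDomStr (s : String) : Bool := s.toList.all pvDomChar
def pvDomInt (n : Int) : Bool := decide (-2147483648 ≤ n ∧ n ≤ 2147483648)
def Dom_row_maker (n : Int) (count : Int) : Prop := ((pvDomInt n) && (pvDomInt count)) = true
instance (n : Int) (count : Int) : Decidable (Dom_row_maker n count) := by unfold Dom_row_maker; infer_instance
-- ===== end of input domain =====

-- ===== PORT A =====
-- Header: B builds the row directly (prefix + center + mirrored prefix) instead of A's
-- recursion; objective: faster (asymptotic). Equivalence is about the return value.
-- Literal port of A. For count < 1 the Python recurses forever (RecursionError):
-- those inputs are outside Pre_; the final else-branch value [] is never claimed.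
def row_maker (n : Int) (count : Int) : List Int :=
  if count = 1 then List.replicate (2 * n - 1).toNat n
  else if 1 < count then [n] ++ row_maker (n - 1) (count - 1) ++ [n]
  else []
termination_by (count - 1).toNat
decreasing_by omega

-- ===== PORT B =====
def row_maker_alt (n : Int) (count : Int) : List Int :=
  let m := n - count + 1
  let desc := PySem.List.pyRange n m (-1)
  desc ++ List.replicate (2 * m - 1).toNat m ++ desc.reverse

-- ===== PRECONDITION & SPEC =====
-- Pre_ excludes count < 1, on which Python A recurses without a base case (RecursionError).
def Pre_row_maker (n : Int) (count : Int) : Prop := 1 ≤ count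
instance (n : Int) (count : Int) : Decidable (Pre_row_maker n count) := by unfold Pre_row_maker; infer_instance
def pvWitness_row_maker : Int × Int := (4, 3)
def Spec_row_maker (n : Int) (count : Int) (out : List Int) : Prop := out = row_maker_alt n count
instance (n : Int) (count : Int) (out : List Int) : Decidable (Spec_row_maker n count out) := by unfold Spec_row_maker; infer_instance

-- ===== CLAIM (what is proved, stated in full; the proofs are below) =====
def Claim_equal_row_maker : Prop := ∀ (n : Int) (count : Int), Dom_row_maker n count → Pre_row_maker n count → Spec_row_maker n count (row_maker n count)

-- ===== LEMMAS AND PROOFS =====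
theorem row_maker_eq_alt (n count : Int) (h : 1 ≤ count) :
    row_maker n count = row_maker_alt n count := by
  by_cases h1 : count = 1
  · subst h1
    rw [row_maker]
    simp [row_maker_alt, PySem.List.pyRange_neg_one_eq_nil (le_refl n)]
  · have hlt : 1 < count := lt_of_le_of_ne h (Ne.symm h1)
    rw [row_maker]
    simp only [h1, if_false, hlt, if_true]
    have ih := row_maker_eq_alt (n - 1) (count - 1) (by omega)
    rw [ih]
    have hm : n - count + 1 < n := by omega
    have hm' : n - 1 - (count - 1) + 1 = n - count + 1 := by ring
    simp only [row_maker_alt, hm', PySem.List.pyRange_neg_one_cons hm]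
    simp
termination_by (count - 1).toNat
decreasing_by omega

-- ===== VERDICT (by name: the statement is the Claim_ definition above) =====
theorem row_maker_spec : Claim_equal_row_maker := by
  intro n count _ hpre
  unfold Spec_row_maker
  exact row_maker_eq_alt n count hpre
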